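-- pv_equiv track=rewrite | github.com/rc2000123/WSM-Vector-Space-Model-Query-Tool | VectorSpace.py | check
-- ===== SOURCE A (Python) =====
-- def check(num,tuple_list):
--     my_list = []
--     count = 0
--     if num == 1:
--         my_list = ["News123256","News119356","News111959","News115859","News120265","News119746","News101763","News108578","News107163","News122750"]
--     if num == 2:
--         my_list = ["News107883","News108482","News109808","News110033","News110141","News110871","News108024","News108653","News108964","News110211"]
--     if num == 3:
--         my_list = ["News108813","News104913","News116613","News103134","News116634","News103728","News110804","News121995","News118108","News103767"]
--     if num == 4:
--         my_list = ["News107883","News110329","News110871","News108482","News105142","News110514","News110033","News110804","News110141","News111579"]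
--     if num == 5:
--         my_list = ["News200049","News200892","News200847","News200908","News200161","News200137","News200056","News200565","News200071","News200898"]
--     for (newsid,score) in tuple_list:
--         if newsid in my_list:
--             count+=1
--     return count
-- ===== SOURCE B (Python) =====
-- TARGETS = {
--     1: ["News123256","News119356","News111959","News115859","News120265","News119746","News101763","News108578","News107163","News122750"],
--     2: ["News107883","News108482","News109808","News110033","News110141","News110871","News108024","News108653","News108964","News110211"],
--     3: ["News108813","News104913","News116613","News103134","News116634","News103728","News110804","News121995","News118108","News103767"],
--     4: ["News107883","News110329","News110871","News108482","News105142","News110514","News110033","News110804","News110141","News111579"],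
--     5: ["News200049","News200892","News200847","News200908","News200161","News200137","News200056","News200565","News200071","News200898"],
-- }
--
-- def check(num, tuple_list):
--     counter = {}
--     for (newsid, score) in tuple_list:
--         counter[newsid] = counter.get(newsid, 0) + 1
--     total = 0
--     for tid in TARGETS.get(num, []):
--         total += counter.get(tid, 0)
--     return total
-- ===== Notes on version B (the rewrite author's own statement) =====
-- stated objective: alternative
-- what changed: Replaces the per-tuple membership scan over the selected 10-id list with a one-pass frequency dictionary of newsids whose counts are then summed over the 10 target ids, selected via a module-level dict instead of an if-chain.
import Mathlib
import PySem

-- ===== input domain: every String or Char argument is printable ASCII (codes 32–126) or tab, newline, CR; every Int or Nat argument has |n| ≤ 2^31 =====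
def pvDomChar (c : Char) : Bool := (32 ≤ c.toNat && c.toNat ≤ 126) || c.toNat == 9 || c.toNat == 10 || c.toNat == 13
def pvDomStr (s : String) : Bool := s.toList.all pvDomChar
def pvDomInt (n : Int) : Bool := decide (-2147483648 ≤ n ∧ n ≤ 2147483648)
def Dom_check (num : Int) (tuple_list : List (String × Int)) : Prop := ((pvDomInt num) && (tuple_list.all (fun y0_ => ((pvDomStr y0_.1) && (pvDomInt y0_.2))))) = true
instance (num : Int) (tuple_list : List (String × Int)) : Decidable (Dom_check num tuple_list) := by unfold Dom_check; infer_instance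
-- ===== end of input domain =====

-- B builds a one-pass frequency dictionary of newsids and sums the counts of the
-- selected target ids (targets chosen from a module-level dict), instead of A's
-- per-tuple membership scan over the target list (alternative decomposition).

-- ===== PORT A =====
def check (num : Int) (tuple_list : List (String × Int)) : Int :=
  let my_list : List String := []
  let my_list := if num == 1 then ["News123256","News119356","News111959","News115859","News120265","News119746","News101763","News108578","News107163","News122750"] else my_list
  let my_list := if num == 2 then ["News107883","News108482","News109808","News110033","News110141","News110871","News108024","News108653","News108964","News110211"] else my_list
  let my_list := if num == 3 then ["News108813","News104913","News116613","News103134","News116634","News103728","News110804","News121995","News118108","News103767"] else my_list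
  let my_list := if num == 4 then ["News107883","News110329","News110871","News108482","News105142","News110514","News110033","News110804","News110141","News111579"] else my_list
  let my_list := if num == 5 then ["News200049","News200892","News200847","News200908","News200161","News200137","News200056","News200565","News200071","News200898"] else my_list
  tuple_list.foldl (fun count p => if my_list.contains p.1 then count + 1 else count) 0

-- ===== PORT B =====
def pvTargets : PySem.Dict Int (List String) := PySem.Dict.ofList [
  (1, ["News123256","News119356","News111959","News115859","News120265","News119746","News101763","News108578","News107163","News122750"]),
  (2, ["News107883","News108482","News109808","News110033","News110141","News110871","News108024","News108653","News108964","News110211"]),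
  (3, ["News108813","News104913","News116613","News103134","News116634","News103728","News110804","News121995","News118108","News103767"]),
  (4, ["News107883","News110329","News110871","News108482","News105142","News110514","News110033","News110804","News110141","News111579"]),
  (5, ["News200049","News200892","News200847","News200908","News200161","News200137","News200056","News200565","News200071","News200898"])]

def check_alt (num : Int) (tuple_list : List (String × Int)) : Int :=
  let counter := tuple_list.foldl (fun d p => d.insert p.1 (d.getD p.1 0 + 1)) PySem.Dict.empty
  (pvTargets.getD num []).foldl (fun total tid => total + counter.getD tid 0) 0

-- ===== PRECONDITION & SPEC =====
def Spec_check (num : Int) (tuple_list : List (String × Int)) (out : Int) : Prop := out = check_alt num tuple_list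
instance (num : Int) (tuple_list : List (String × Int)) (out : Int) : Decidable (Spec_check num tuple_list out) := by unfold Spec_check; infer_instance

-- ===== CLAIM (what is proved, stated in full; the proofs are below) =====
def Claim_equal_check : Prop := ∀ (num : Int) (tuple_list : List (String × Int)), Dom_check num tuple_list → Spec_check num tuple_list (check num tuple_list)

-- ===== LEMMAS AND PROOFS =====

-- sum over a duplicate-free target list of occurrence counts = countP of membership
theorem sum_counts_eq_countP (L : List String) (hL : L.Nodup) (ids : List String) :
    (L.map (fun t => (ids.count t : Int))).sum = (ids.countP (fun x => L.contains x) : Int) := by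
  induction ids with
  | nil => simp
  | cons x ids ih =>
    have hcnt : ∀ t, (List.count t (x :: ids) : Int)
        = (ids.count t : Int) + (if x == t then 1 else 0) := by
      intro t
      rw [List.count_cons]
      split_ifs <;> push_cast <;> ring
    simp only [hcnt]
    rw [PySem.List.sum_map_add_int, ih, PySem.List.sum_map_ite_one_zero]
    have hc : L.countP (fun t => x == t) = L.count x := by
      unfold List.count
      exact List.countP_congr (fun a _ => by simp [BEq.comm])
    rw [hc, List.countP_cons]
    by_cases hx : x ∈ L
    · simp [List.count_eq_one_of_mem hL hx, hx]
    · simp [List.count_eq_zero_of_not_mem hx, hx]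

-- the two loop shapes agree for any duplicate-free target list
theorem core_eq (L : List String) (hL : L.Nodup) (tl : List (String × Int)) :
    L.foldl (fun (total : Int) tid =>
        total + (tl.foldl (fun d p => d.insert p.1 (d.getD p.1 0 + 1)) PySem.Dict.empty).getD tid 0) 0
      = tl.foldl (fun (count : Int) p => if L.contains p.1 then count + 1 else count) 0 := by
  have hcounter : tl.foldl (fun d p => d.insert p.1 (d.getD p.1 0 + 1)) PySem.Dict.empty
      = PySem.Dict.counter (tl.map (·.1)) := by
    rw [← PySem.Dict.foldl_insert_getD_add_one_eq_counter, List.foldl_map]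
  simp only [hcounter, PySem.Dict.getD_counter]
  rw [PySem.List.foldl_add, PySem.List.foldl_count_if, sum_counts_eq_countP L hL, List.countP_map]
  rfl

-- ===== VERDICT (by name: the statement is the Claim_ definition above) =====
theorem check_spec : Claim_equal_check := by
  intro num tl _
  simp only [Spec_check, check, check_alt]
  by_cases h1 : num = 1
  · subst h1
    rw [core_eq (pvTargets.getD (1:Int) []) (by decide) tl]; rfl
  by_cases h2 : num = 2
  · subst h2
    rw [core_eq (pvTargets.getD (2:Int) []) (by decide) tl]; rfl
  by_cases h3 : num = 3
  · subst h3
    rw [core_eq (pvTargets.getD (3:Int) []) (by decide) tl]; rfl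
  by_cases h4 : num = 4
  · subst h4
    rw [core_eq (pvTargets.getD (4:Int) []) (by decide) tl]; rfl
  by_cases h5 : num = 5
  · subst h5
    rw [core_eq (pvTargets.getD (5:Int) []) (by decide) tl]; rfl
  · have hd : pvTargets = PySem.Dict.mk [
      (1, ["News123256","News119356","News111959","News115859","News120265","News119746","News101763","News108578","News107163","News122750"]),
      (2, ["News107883","News108482","News109808","News110033","News110141","News110871","News108024","News108653","News108964","News110211"]),
      (3, ["News108813","News104913","News116613","News103134","News116634","News103728","News110804","News121995","News118108","News103767"]),
      (4, ["News107883","News110329","News110871","News108482","News105142","News110514","News110033","News110804","News110141","News111579"]),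
      (5, ["News200049","News200892","News200847","News200908","News200161","News200137","News200056","News200565","News200071","News200898"])] := by rfl
    have k1 : ((1:Int) == num) = false := beq_eq_false_iff_ne.mpr (Ne.symm h1)
    have k2 : ((2:Int) == num) = false := beq_eq_false_iff_ne.mpr (Ne.symm h2)
    have k3 : ((3:Int) == num) = false := beq_eq_false_iff_ne.mpr (Ne.symm h3)
    have k4 : ((4:Int) == num) = false := beq_eq_false_iff_ne.mpr (Ne.symm h4)
    have k5 : ((5:Int) == num) = false := beq_eq_false_iff_ne.mpr (Ne.symm h5)
    have hsel : pvTargets.getD num [] = [] := by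
      rw [hd]
      simp [PySem.Dict.getD, PySem.Dict.get?, k1, k2, k3, k4, k5]
    have n1 : (num == (1:Int)) = false := beq_eq_false_iff_ne.mpr h1
    have n2 : (num == (2:Int)) = false := beq_eq_false_iff_ne.mpr h2
    have n3 : (num == (3:Int)) = false := beq_eq_false_iff_ne.mpr h3
    have n4 : (num == (4:Int)) = false := beq_eq_false_iff_ne.mpr h4
    have n5 : (num == (5:Int)) = false := beq_eq_false_iff_ne.mpr h5
    rw [hsel, core_eq [] (by decide) tl]
    simp only [n1, n2, n3, n4, n5, Bool.false_eq_true, if_false]
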